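-- pv_equiv track=rewrite | github.com/NguyenTinh98/NER_MOCKPROJECT | utils/cut256.py | cutting_subword
-- ===== SOURCE A (Python) =====
-- def cutting_subword(X, y, size=256):
--     res_X, res_y = [], []
--     punct = '.!?'
--     st = 0
--     cur = 0
--
--     while (st < len(X)-size):
--         flag = True
--         for i in range(st+size-1, st-1, -1):
--             if X[i] in punct and y[i] == 'O':
--                 cur = i+1
--                 flag = False
--                 break
--         if flag:
--             for i in range(st+size-1, st-1, -1):
--                 if isNotSubword(X, i):
--                     cur = i+1
--                     if y[i] == 'O':
--                         cur = i+1
--                         break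
--         if st == cur:
--             cur += size
--
--         res_X.append(X[st: cur])
--         res_y.append(y[st: cur])
--         st = cur
--
--     res_X.append(X[cur:])
--     res_y.append(y[cur:])
--     return res_X, res_y
--
-- def isNotSubword(x, idx, sub = '##'):
--     if sub == '##':
--         return sub not in x[idx] and idx < len(x) - 1 and sub not in x[idx+1]
--     elif sub == '@@':
--         return sub not in x[idx] and idx > 0 and sub not in x[idx-1]
--     return sub in x[idx] and idx < len(x) - 1 and sub in x[idx+1]
-- ===== SOURCE B (Python) =====
-- def _boundary(X, i):
--     # token i ends a whole word: neither it nor the next token is a '##' subword piece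
--     return '##' not in X[i] and i < len(X) - 1 and '##' not in X[i + 1]
--
--
-- def cutting_subword(X, y, size=256):
--     res_X, res_y = [], []
--     st = 0
--     cur = 0
--     while st < len(X) - size:
--         best_punct = last_o = first_sub = None
--         for i in range(st, st + size):
--             if X[i] in '.!?' and y[i] == 'O':
--                 best_punct = i
--             if _boundary(X, i):
--                 if first_sub is None:
--                     first_sub = i
--                 if y[i] == 'O':
--                     last_o = i
--         if best_punct is not None:
--             cur = best_punct + 1
--         elif last_o is not None:
--             cur = last_o + 1
--         elif first_sub is not None:
--             cur = first_sub + 1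
--         if st == cur:
--             cur += size
--         res_X.append(X[st:cur])
--         res_y.append(y[st:cur])
--         st = cur
--     res_X.append(X[cur:])
--     res_y.append(y[cur:])
--     return res_X, res_y
-- ===== Notes on version B (the rewrite author's own statement) =====
-- stated objective: alternative
-- what changed: The two backward break-scans per chunk (punctuation scan, then subword-boundary scan) are replaced by one forward pass over the window that maintains three candidates (last punctuation-at-O, last boundary-at-O, first boundary) combined afterwards.
import Mathlib
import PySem

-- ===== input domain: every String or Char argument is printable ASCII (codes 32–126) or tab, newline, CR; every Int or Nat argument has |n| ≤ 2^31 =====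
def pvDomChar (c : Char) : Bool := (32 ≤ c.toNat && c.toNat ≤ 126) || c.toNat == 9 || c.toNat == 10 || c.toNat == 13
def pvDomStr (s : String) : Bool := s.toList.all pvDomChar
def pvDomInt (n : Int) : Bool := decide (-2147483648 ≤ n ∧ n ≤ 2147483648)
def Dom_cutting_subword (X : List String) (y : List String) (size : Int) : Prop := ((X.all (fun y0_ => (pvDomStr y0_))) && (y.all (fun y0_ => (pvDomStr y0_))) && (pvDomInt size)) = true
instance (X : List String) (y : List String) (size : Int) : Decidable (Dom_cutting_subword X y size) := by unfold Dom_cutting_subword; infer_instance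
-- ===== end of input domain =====

-- B replaces A's two backward break-scans per chunk by a single forward pass keeping three candidates (alternative decomposition, same cost).


-- ===== PORT A =====

-- x[idx] as a total helper; inside Pre_ every index used is in range (Python would raise IndexError otherwise)
def pyTok (x : List String) (i : Int) : String := (PySem.List.pyGet? x i).getD ""

-- X[i] in '.!?' and y[i] == 'O'
def punctO (X y : List String) (i : Int) : Bool :=
  PySem.Str.isIn (pyTok X i) ".!?" && (pyTok y i == "O")

-- literal port of isNotSubword(x, idx, sub)
def isNotSubword (x : List String) (idx : Int) (sub : String) : Bool :=
  if sub == "##" then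
    !(PySem.Str.isIn sub (pyTok x idx)) && decide (idx < (x.length : Int) - 1) && !(PySem.Str.isIn sub (pyTok x (idx + 1)))
  else if sub == "@@" then
    !(PySem.Str.isIn sub (pyTok x idx)) && decide (0 < idx) && !(PySem.Str.isIn sub (pyTok x (idx - 1)))
  else
    PySem.Str.isIn sub (pyTok x idx) && decide (idx < (x.length : Int) - 1) && PySem.Str.isIn sub (pyTok x (idx + 1))

-- first backward scan: for i in range(st+size-1, st-1, -1): if punctO i: cur = i+1; break
-- (k counts remaining indices; the k+1 step looks at i = st+k, so indices go st+size-1, …, st)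
def scanPunct (X y : List String) (st : Int) : Nat → Option Int
  | 0 => none
  | Nat.succ k => if punctO X y (st + (k : Int)) then some (st + (k : Int) + 1) else scanPunct X y st k

-- second backward scan: cur = i+1 at every isNotSubword i, break when additionally y[i]=='O'
def scanSub (X y : List String) (st : Int) (cur : Int) : Nat → Int
  | 0 => cur
  | Nat.succ k =>
    if isNotSubword X (st + (k : Int)) "##" then
      if pyTok y (st + (k : Int)) == "O" then st + (k : Int) + 1
      else scanSub X y st (st + (k : Int) + 1) k
    else scanSub X y st cur k

-- the while loop of A; fuel = len(X)+1 suffices whenever size ≥ 1 (st strictly increases and stays < len(X))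
def loopA (X y : List String) (size : Int) : Nat → Int → Int → List (List String) → List (List String) → List (List String) × List (List String)
  | 0, _, cur, resX, resy =>
      (resX ++ [PySem.List.slice X (some cur) none], resy ++ [PySem.List.slice y (some cur) none])
  | Nat.succ fuel, st, cur, resX, resy =>
      if st < (X.length : Int) - size then
        let cur1 := match scanPunct X y st size.toNat with
                    | some c => c
                    | none => scanSub X y st cur size.toNat
        let cur2 := if st = cur1 then cur1 + size else cur1
        loopA X y size fuel cur2 cur2
          (resX ++ [PySem.List.slice X (some st) (some cur2)])
          (resy ++ [PySem.List.slice y (some st) (some cur2)])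
      else
        (resX ++ [PySem.List.slice X (some cur) none], resy ++ [PySem.List.slice y (some cur) none])

def cutting_subword (X : List String) (y : List String) (size : Int) : List (List String) × List (List String) :=
  loopA X y size (X.length + 1) 0 0 [] []

-- ===== PORT B =====

-- _boundary(X, i): '##' not in X[i] and i < len(X)-1 and '##' not in X[i+1]
def boundary (X : List String) (i : Int) : Bool :=
  !(PySem.Str.isIn "##" (pyTok X i)) && decide (i < (X.length : Int) - 1) && !(PySem.Str.isIn "##" (pyTok X (i + 1)))

-- one forward step updating (best_punct, last_o, first_sub)
def stepB (X y : List String) (i : Int) (s : Option Int × Option Int × Option Int) : Option Int × Option Int × Option Int :=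
  (if punctO X y i then some i else s.1,
   if boundary X i && (pyTok y i == "O") then some i else s.2.1,
   if boundary X i && s.2.2.isNone then some i else s.2.2)

-- for i in range(st, st+size): one forward pass
def scanFwd (X y : List String) : Int → Nat → Option Int × Option Int × Option Int → Option Int × Option Int × Option Int
  | _, 0, s => s
  | i, Nat.succ n, s => scanFwd X y (i + 1) n (stepB X y i s)

-- combine the three candidates exactly as B's if/elif chain does
def combineB (s : Option Int × Option Int × Option Int) (cur : Int) : Int :=
  match s.1 with
  | some i => i + 1
  | none =>
    match s.2.1 with
    | some i => i + 1
    | none =>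
      match s.2.2 with
      | some i => i + 1
      | none => cur

def loopB (X y : List String) (size : Int) : Nat → Int → Int → List (List String) → List (List String) → List (List String) × List (List String)
  | 0, _, cur, resX, resy =>
      (resX ++ [PySem.List.slice X (some cur) none], resy ++ [PySem.List.slice y (some cur) none])
  | Nat.succ fuel, st, cur, resX, resy =>
      if st < (X.length : Int) - size then
        let cur1 := combineB (scanFwd X y st size.toNat (none, none, none)) cur
        let cur2 := if st = cur1 then cur1 + size else cur1
        loopB X y size fuel cur2 cur2
          (resX ++ [PySem.List.slice X (some st) (some cur2)])
          (resy ++ [PySem.List.slice y (some st) (some cur2)])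
      else
        (resX ++ [PySem.List.slice X (some cur) none], resy ++ [PySem.List.slice y (some cur) none])

def cutting_subword_alt (X : List String) (y : List String) (size : Int) : List (List String) × List (List String) :=
  loopB X y size (X.length + 1) 0 0 [] []

-- ===== PRECONDITION & SPEC =====
-- Pre_ excludes nonpositive size (A loops forever) and inputs where y is shorter than X while chunking runs
-- (indexing y then may raise IndexError in either version); this also excludes some short-y inputs on which A
-- happens to return because its backward scan breaks before reading a missing y index.
def Pre_cutting_subword (X : List String) (y : List String) (size : Int) : Prop :=
  1 ≤ size ∧ ((X.length : Int) ≤ size ∨ X.length ≤ y.length)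
instance (X : List String) (y : List String) (size : Int) : Decidable (Pre_cutting_subword X y size) := by
  unfold Pre_cutting_subword; infer_instance

def pvWitness_cutting_subword : List String × List String × Int := (["a", "b"], ["O", "O"], 1)

def Spec_cutting_subword (X : List String) (y : List String) (size : Int) (out : List (List String) × List (List String)) : Prop := out = cutting_subword_alt X y size
instance (X : List String) (y : List String) (size : Int) (out : List (List String) × List (List String)) : Decidable (Spec_cutting_subword X y size out) := by unfold Spec_cutting_subword; infer_instance

-- ===== CLAIM (what is proved, stated in full; the proofs are below) =====
def Claim_equal_cutting_subword : Prop := ∀ (X : List String) (y : List String) (size : Int), Dom_cutting_subword X y size → Pre_cutting_subword X y size → Spec_cutting_subword X y size (cutting_subword X y size)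

-- ===== LEMMAS AND PROOFS =====

-- snoc form of the forward pass: processing n+1 indices = processing n, then stepping at the top index
theorem scanFwd_succ (X y : List String) : ∀ (n : Nat) (i : Int) (s : Option Int × Option Int × Option Int),
    scanFwd X y i (n + 1) s = stepB X y (i + n) (scanFwd X y i n s) := by
  intro n
  induction n with
  | zero => intro i s; simp [scanFwd]
  | succ n ih =>
    intro i s
    show scanFwd X y (i + 1) (n + 1) (stepB X y i s) = _
    rw [ih]
    have h1 : i + 1 + (n : Int) = i + ((n : Nat) + 1 : Nat) := by push_cast; ring
    rw [h1]
    rfl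

-- A's boundary test with sub = '##' is B's _boundary
theorem isNotSubword_eq_boundary (X : List String) (i : Int) :
    isNotSubword X i "##" = boundary X i := by
  simp [isNotSubword, boundary]

-- the first backward scan equals the best_punct component of the forward pass (+1)
theorem scanPunct_eq (X y : List String) : ∀ (n : Nat) (st : Int) (b c : Option Int),
    scanPunct X y st n = Option.map (· + 1) (scanFwd X y st n (none, b, c)).1 := by
  intro n
  induction n with
  | zero => intro st b c; simp [scanPunct, scanFwd]
  | succ n ih =>
    intro st b c
    rw [scanFwd_succ]
    show (if punctO X y (st + (n : Int)) then some (st + (n : Int) + 1) else scanPunct X y st n) = _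
    by_cases hp : punctO X y (st + (n : Int)) = true
    · simp [hp, stepB]
    · simp only [Bool.not_eq_true] at hp
      simp [hp, stepB, ih st b c]

-- the second backward scan equals the (last_o, first_sub) fallback of the forward pass
theorem scanSub_eq (X y : List String) : ∀ (n : Nat) (st cur : Int) (a : Option Int),
    scanSub X y st cur n =
      (match (scanFwd X y st n (a, none, none)).2.1 with
       | some i => i + 1
       | none =>
         match (scanFwd X y st n (a, none, none)).2.2 with
         | some i => i + 1
         | none => cur) := by
  intro n
  induction n with
  | zero => intro st cur a; simp [scanSub, scanFwd]
  | succ n ih =>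
    intro st cur a
    rw [scanFwd_succ]
    show (if isNotSubword X (st + (n : Int)) "##" then _ else _) = _
    rw [isNotSubword_eq_boundary]
    by_cases hb : boundary X (st + (n : Int)) = true
    · by_cases hy : (pyTok y (st + (n : Int)) == "O") = true
      · simp [hb, hy, stepB]
      · simp only [Bool.not_eq_true] at hy
        simp only [hb, hy, stepB, Bool.and_false, if_true, Bool.true_and]
        rw [ih st (st + (n : Int) + 1) a]
        cases (scanFwd X y st n (a, none, none)).2.1 with
        | some i => simp
        | none =>
          cases (scanFwd X y st n (a, none, none)).2.2 with
          | some i => simp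
          | none => simp
    · simp only [Bool.not_eq_true] at hb
      simp only [hb, stepB, Bool.false_and]
      exact ih st cur a

-- the whole per-chunk cursor computation of A equals B's combineB of the forward pass
theorem inner_eq (X y : List String) (n : Nat) (st cur : Int) :
    (match scanPunct X y st n with
     | some c => c
     | none => scanSub X y st cur n) = combineB (scanFwd X y st n (none, none, none)) cur := by
  rw [scanPunct_eq X y n st none none]
  unfold combineB
  cases (scanFwd X y st n (none, none, none)).1 with
  | some i => simp
  | none =>
    simp only [Option.map_none]
    rw [scanSub_eq X y n st cur none]

-- both while loops agree for every fuel and state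
theorem loop_eq (X y : List String) (size : Int) : ∀ (fuel : Nat) (st cur : Int) (resX resy : List (List String)),
    loopA X y size fuel st cur resX resy = loopB X y size fuel st cur resX resy := by
  intro fuel
  induction fuel with
  | zero => intro st cur resX resy; rfl
  | succ fuel ih =>
    intro st cur resX resy
    show (if st < (X.length : Int) - size then _ else _) = (if st < (X.length : Int) - size then _ else _)
    by_cases h : st < (X.length : Int) - size
    · simp only [h, if_true]
      rw [inner_eq X y size.toNat st cur]
      exact ih _ _ _ _
    · simp only [h, if_false]

-- ===== VERDICT (by name: the statement is the Claim_ definition above) =====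
theorem cutting_subword_spec : Claim_equal_cutting_subword := by
  intro X y size _ _
  unfold Spec_cutting_subword cutting_subword cutting_subword_alt
  exact loop_eq X y size _ 0 0 [] []
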